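-- pv_equiv track=rewrite | github.com/colt8880/clinical-knowledge-graph | api/app/evaluator/predicates/composites.py | eval_any_of
-- ===== SOURCE A (Python) =====
-- def eval_any_of(
--     children_results: list[str],
-- ) -> tuple[str, bool]:
--     """Evaluate any_of composite.
--
--     Returns (result, short_circuited).
--     Empty list -> false (per predicate-catalog.yaml empty_semantics).
--     """
--     if not children_results:
--         return "false", False
--
--     has_unknown = False
--     for r in children_results:
--         if r == "true":
--             return "true", True
--         if r == "unknown":
--             has_unknown = True
--
--     if has_unknown:
--         return "unknown", False
--     return "false", False
-- ===== SOURCE B (Python) =====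
-- def eval_any_of(
--     children_results: list[str],
-- ) -> tuple[str, bool]:
--     """Evaluate any_of composite: priority-ordered membership scans."""
--     if not children_results:
--         return "false", False
--     if "true" in children_results:
--         return "true", True
--     if "unknown" in children_results:
--         return "unknown", False
--     return "false", False
-- ===== Notes on version B (the rewrite author's own statement) =====
-- stated objective: idiomatic
-- what changed: Replaced A's single stateful pass with an early return and a has_unknown flag by priority-ordered membership tests ('true' in list, then 'unknown' in list) with no mutable state.
import Mathlib
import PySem

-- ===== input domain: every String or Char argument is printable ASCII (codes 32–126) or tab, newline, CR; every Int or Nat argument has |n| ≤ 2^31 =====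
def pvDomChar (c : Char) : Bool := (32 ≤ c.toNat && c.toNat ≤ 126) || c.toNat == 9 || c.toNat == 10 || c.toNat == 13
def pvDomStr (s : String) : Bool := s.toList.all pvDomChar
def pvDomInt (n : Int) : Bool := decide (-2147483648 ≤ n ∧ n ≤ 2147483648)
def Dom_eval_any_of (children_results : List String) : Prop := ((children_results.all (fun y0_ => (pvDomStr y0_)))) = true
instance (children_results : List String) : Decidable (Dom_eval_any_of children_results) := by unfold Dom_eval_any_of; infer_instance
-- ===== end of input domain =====

-- B replaces A's single stateful loop (early exit + has_unknown flag) by two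
-- priority-ordered membership scans; same return tuples (idiomatic, not faster).

-- ===== PORT A =====
-- A's for-loop with early return and the has_unknown flag, as structural recursion.
def evalAnyLoop : List String → Bool → String × Bool
  | [], hu => if hu then ("unknown", false) else ("false", false)
  | r :: rest, hu =>
    if r == "true" then ("true", true)
    else evalAnyLoop rest (if r == "unknown" then true else hu)

def eval_any_of (children_results : List String) : String × Bool :=
  if children_results.isEmpty then ("false", false)
  else evalAnyLoop children_results false

-- ===== PORT B =====
def eval_any_of_alt (children_results : List String) : String × Bool :=
  if children_results.isEmpty then ("false", false)
  else if children_results.contains "true" then ("true", true)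
  else if children_results.contains "unknown" then ("unknown", false)
  else ("false", false)

-- ===== PRECONDITION & SPEC =====
def Spec_eval_any_of (children_results : List String) (out : String × Bool) : Prop := out = eval_any_of_alt children_results
instance (children_results : List String) (out : String × Bool) : Decidable (Spec_eval_any_of children_results out) := by unfold Spec_eval_any_of; infer_instance

-- ===== CLAIM (what is proved, stated in full; the proofs are below) =====
def Claim_equal_eval_any_of : Prop := ∀ (children_results : List String), Dom_eval_any_of children_results → Spec_eval_any_of children_results (eval_any_of children_results)

-- ===== LEMMAS AND PROOFS =====
theorem evalAnyLoop_eq (l : List String) (hu : Bool) :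
    evalAnyLoop l hu =
      if l.contains "true" then ("true", true)
      else if hu || l.contains "unknown" then ("unknown", false)
      else ("false", false) := by
  induction l generalizing hu with
  | nil => simp [evalAnyLoop]
  | cons r rest ih =>
    by_cases h1 : r = "true"
    · subst h1; simp [evalAnyLoop]
    · by_cases h2 : r = "unknown"
      · subst h2
        simp [evalAnyLoop, ih, Ne.symm h1]
      · simp [evalAnyLoop, ih, h1, h2, Ne.symm h1, Ne.symm h2]

-- ===== VERDICT (by name: the statement is the Claim_ definition above) =====
theorem eval_any_of_spec : Claim_equal_eval_any_of := by
  intro l _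
  unfold Spec_eval_any_of eval_any_of eval_any_of_alt
  by_cases h : l.isEmpty <;> simp [h, evalAnyLoop_eq]
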